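-- pv_equiv track=rewrite | github.com/ChrisC2592/DuplicateBookmarkCheckerRush | BookMarkManager.py | isDuplicateURL
-- ===== SOURCE A (Python) =====
-- def isDuplicateURL(tagData):
-- 	occurences = []
--
-- 	for tag in tagData:
-- 		count = 0
-- 		i = 0
-- 		pTitle,pHref,pFolder,pSLine,pDT = tag
-- 		for x in tagData:
-- 			tTitle,tHref,tFolder,tSLine,tDT = tagData[i]
-- 			if pHref == tHref:
-- 				count += 1
-- 			i += 1
-- 		occurences.append(count)
--
-- 	duplicates = set()
-- 	index = 0
-- 	while index < len(tagData):
-- 		if occurences[index] != 1: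
-- 			duplicates.add(tagData[index])
-- 		index += 1
-- 	return duplicates
-- ===== SOURCE B (Python) =====
-- def isDuplicateURL(tagData):
-- 	counts = {}
-- 	for title, href, folder, sLine, dt in tagData:
-- 		counts[href] = counts.get(href, 0) + 1
-- 	duplicates = set()
-- 	for tag in tagData:
-- 		if counts[tag[1]] != 1:
-- 			duplicates.add(tag)
-- 	return duplicates
-- ===== Notes on version B (the rewrite author's own statement) =====
-- stated objective: faster
-- what changed: Replaces A's quadratic nested scan (a per-tag inner pass over the whole list building an occurrences array, then an index-driven while loop) with one dict-counting pass over the hrefs followed by one filtering pass over the tags.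
import Mathlib
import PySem

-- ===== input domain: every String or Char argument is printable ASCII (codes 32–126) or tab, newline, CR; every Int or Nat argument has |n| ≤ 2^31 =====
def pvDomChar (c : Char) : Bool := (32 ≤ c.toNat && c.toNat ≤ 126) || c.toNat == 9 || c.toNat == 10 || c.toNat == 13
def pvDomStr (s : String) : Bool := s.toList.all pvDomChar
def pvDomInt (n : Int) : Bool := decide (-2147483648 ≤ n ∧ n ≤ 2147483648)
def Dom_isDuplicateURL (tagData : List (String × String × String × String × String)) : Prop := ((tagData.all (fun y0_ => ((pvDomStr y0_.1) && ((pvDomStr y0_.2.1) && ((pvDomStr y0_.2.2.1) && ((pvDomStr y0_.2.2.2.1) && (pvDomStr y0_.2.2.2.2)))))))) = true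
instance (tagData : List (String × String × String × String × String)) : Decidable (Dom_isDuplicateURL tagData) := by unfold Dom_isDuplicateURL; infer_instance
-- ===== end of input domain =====

-- B replaces A's quadratic nested scan with one dict-counting pass plus one filtering pass (asymptotically faster).
-- ===== PORT A =====
-- A: for each tag, an inner pass over tagData (reading tagData[i]) counts equal hrefs into 'occurences';
-- then a while loop over the indices adds tagData[index] to the result set where occurences[index] != 1.
def isDuplicateURL (tagData : List (String × String × String × String × String)) : List (String × String × String × String × String) :=
  let occurences : List Int := tagData.foldl (fun occ tag =>
    let res := tagData.foldl
      (fun (st : Int × Int) (_x : String × String × String × String × String) =>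
        let t := PySem.List.pyGetD tagData st.2 ("", "", "", "", "")
        ((if tag.2.1 == t.2.1 then st.1 + 1 else st.1), st.2 + 1))
      (0, 0)
    occ ++ [res.1]) []
  (List.range tagData.length).foldl
    (fun dups (index : Nat) =>
      if PySem.List.pyGetD occurences ((index : Int)) 0 ≠ 1 then
        PySem.Set.add dups (PySem.List.pyGetD tagData ((index : Int)) ("", "", "", "", ""))
      else dups)
    PySem.Set.empty

-- ===== PORT B =====
-- B: one counting pass 'counts[href] = counts.get(href, 0) + 1', then one filtering pass over the tags.
-- 'counts[tag[1]]' cannot raise (every href was counted), so 'getD … 0' is exact there.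
def isDuplicateURL_alt (tagData : List (String × String × String × String × String)) : List (String × String × String × String × String) :=
  let counts : PySem.Dict String Int :=
    tagData.foldl (fun d tag => PySem.Dict.modify d tag.2.1 0 (fun v => v + 1)) PySem.Dict.empty
  tagData.foldl
    (fun duplicates tag =>
      if PySem.Dict.getD counts tag.2.1 0 ≠ 1 then PySem.Set.add duplicates tag else duplicates)
    PySem.Set.empty

-- ===== PRECONDITION & SPEC =====
def Spec_isDuplicateURL (tagData : List (String × String × String × String × String)) (out : List (String × String × String × String × String)) : Prop := out = isDuplicateURL_alt tagData
instance (tagData : List (String × String × String × String × String)) (out : List (String × String × String × String × String)) : Decidable (Spec_isDuplicateURL tagData out) := by unfold Spec_isDuplicateURL; infer_instance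

-- ===== CLAIM (what is proved, stated in full; the proofs are below) =====
def Claim_equal_isDuplicateURL : Prop := ∀ (tagData : List (String × String × String × String × String)), Dom_isDuplicateURL tagData → Spec_isDuplicateURL tagData (isDuplicateURL tagData)

-- ===== LEMMAS AND PROOFS =====

-- A's inner loop, started at index i, counts the matching hrefs of the next ys.length elements.
theorem pv_inner_count (full : List (String × String × String × String × String))
    (href : String) :
    ∀ (ys : List (String × String × String × String × String)) (c : Int) (i : Nat),
      i + ys.length ≤ full.length →
      (ys.foldl
        (fun (st : Int × Int) (_x : String × String × String × String × String) =>
          let t := PySem.List.pyGetD full st.2 ("", "", "", "", "")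
          ((if href == t.2.1 then st.1 + 1 else st.1), st.2 + 1))
        (c, (i : Int))).1
      = c + (((full.drop i).take ys.length).countP (fun t => href == t.2.1) : Int) := by
  intro ys
  induction ys with
  | nil => intro c i _; simp
  | cons y ys ih =>
    intro c i h
    have hi : i < full.length := by simp at h; omega
    have hget : PySem.List.pyGetD full (i : Int) ("", "", "", "", "") = full[i] := by
      rw [PySem.List.pyGetD_natCast]
      exact List.getD_eq_getElem _ _ hi
    have hdrop : full.drop i = full[i] :: full.drop (i + 1) :=
      List.drop_eq_getElem_cons hi
    have hcast : ((i : Int) + 1) = ((i + 1 : Nat) : Int) := by push_cast; ring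
    simp only [List.foldl_cons, hget, hcast]
    rw [ih _ (i + 1) (by simp at h ⊢; omega)]
    rw [hdrop]
    simp only [List.length_cons, List.take_succ_cons, List.countP_cons]
    by_cases hb : (href == full[i].2.1) = true <;> simp [hb] <;> omega

-- The index-driven loop over range(len xs) reading xs.getD / (xs.map g).getD is the direct loop over xs.
theorem pv_final_loop (g : (String × String × String × String × String) → Int) :
    ∀ (xs : List (String × String × String × String × String)) (s : List (String × String × String × String × String)),
      (List.range xs.length).foldl
        (fun dups index =>
          if (xs.map g).getD index 0 ≠ 1 then
            PySem.Set.add dups (xs.getD index ("", "", "", "", ""))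
          else dups) s
      = xs.foldl (fun dups tag => if g tag ≠ 1 then PySem.Set.add dups tag else dups) s := by
  intro xs
  induction xs with
  | nil => intro s; simp
  | cons x xs ih =>
    intro s
    simp only [List.length_cons, List.range_succ_eq_map, List.foldl_cons, List.foldl_map,
      List.map_cons, List.getD_cons_zero, List.getD_cons_succ]
    exact ih _

-- B's counting dict looked up at k is the number of tags whose href is k.
theorem pv_counts_getD (tagData : List (String × String × String × String × String)) (k : String) :
    (tagData.foldl (fun d tag => PySem.Dict.modify d tag.2.1 0 (fun v => v + 1)) PySem.Dict.empty).getD k 0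
      = (tagData.countP (fun t => t.2.1 == k) : Int) := by
  rw [← List.foldl_map (f := fun tag : String × String × String × String × String => tag.2.1)
        (g := fun d x => PySem.Dict.modify d x 0 (fun v => v + 1)),
      PySem.Dict.getD_foldl_modify_add_one]
  rw [List.count_eq_countP, List.countP_map]
  simp [Function.comp_def, PySem.Dict.getD_empty]

theorem pv_ports_agree (tagData : List (String × String × String × String × String)) :
    isDuplicateURL tagData = isDuplicateURL_alt tagData := by
  unfold isDuplicateURL isDuplicateURL_alt
  -- the occurences list is the per-tag match count
  have hocc : tagData.foldl (fun occ tag =>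
      let res := tagData.foldl
        (fun (st : Int × Int) (_x : String × String × String × String × String) =>
          let t := PySem.List.pyGetD tagData st.2 ("", "", "", "", "")
          ((if tag.2.1 == t.2.1 then st.1 + 1 else st.1), st.2 + 1))
        (0, 0)
      occ ++ [res.1]) []
      = tagData.map (fun tag => (tagData.countP (fun t => tag.2.1 == t.2.1) : Int)) := by
    rw [PySem.List.foldl_append_singleton_eq_map]
    refine List.map_congr_left (fun tag _ => ?_)
    have := pv_inner_count tagData tag.2.1 tagData 0 0 (by simp)
    simpa using this
  simp only [hocc, PySem.List.pyGetD_natCast]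
  rw [pv_final_loop (fun tag => (tagData.countP (fun t => tag.2.1 == t.2.1) : Int)) tagData]
  refine PySem.List.foldl_congr_mem _ _ _ _ (fun s tag htag => ?_)
  rw [pv_counts_getD]
  have : tagData.countP (fun t => t.2.1 == tag.2.1) = tagData.countP (fun t => tag.2.1 == t.2.1) :=
    List.countP_congr (fun t _ => by rw [Bool.beq_comm])
  rw [this]

-- ===== VERDICT (by name: the statement is the Claim_ definition above) =====
theorem isDuplicateURL_spec : Claim_equal_isDuplicateURL := by
  intro tagData _
  unfold Spec_isDuplicateURL
  exact pv_ports_agree tagData
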